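-- pv_equiv track=rewrite | github.com/lgeoffroy/aoc | day6.py | solve
-- ===== SOURCE A (Python) =====
-- def nb_yes_for(lines):
--     answers = []
--     for line in lines:
--         for x in line:
--             if x not in answers:
--                 answers.append(x)
--     return len(answers)
--
-- def nb_all_yes_for(lines):
--     answers = []
--     for x in 'abcdefghijklmnopqrstuvwxyz':
--         if all([x in line for line in lines]):
--             answers.append(x)
--     return len(answers)
--
-- def solve(lines):
--     lines.append('')
--     nb_yes = 0
--     nb_all_yes = 0
--     buffer = []
--     for line in lines:
--         if line == '':
--             nb_yes += nb_yes_for(buffer)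
--             nb_all_yes += nb_all_yes_for(buffer)
--             buffer = []
--         else:
--             buffer.append(line)
--
--     return (nb_yes, nb_all_yes)
-- ===== SOURCE B (Python) =====
-- def solve(lines):
--     lines.append('')
--     nb_yes = 0
--     nb_all_yes = 0
--     buffer = []
--     for line in lines:
--         if line == '':
--             union = set()
--             for l in buffer:
--                 union |= set(l)
--             nb_yes += len(union)
--             inter = set('abcdefghijklmnopqrstuvwxyz')
--             for l in buffer:
--                 inter &= set(l)
--             nb_all_yes += len(inter)
--             buffer = []
--         else:
--             buffer.append(line)
--     return (nb_yes, nb_all_yes)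
-- ===== Notes on version B (the rewrite author's own statement) =====
-- stated objective: simpler
-- what changed: Per group, the character-by-character membership-scan dedup and the 26-letter all() scan are replaced by set union over the group's lines and set intersection seeded with the full alphabet.
import Mathlib
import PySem

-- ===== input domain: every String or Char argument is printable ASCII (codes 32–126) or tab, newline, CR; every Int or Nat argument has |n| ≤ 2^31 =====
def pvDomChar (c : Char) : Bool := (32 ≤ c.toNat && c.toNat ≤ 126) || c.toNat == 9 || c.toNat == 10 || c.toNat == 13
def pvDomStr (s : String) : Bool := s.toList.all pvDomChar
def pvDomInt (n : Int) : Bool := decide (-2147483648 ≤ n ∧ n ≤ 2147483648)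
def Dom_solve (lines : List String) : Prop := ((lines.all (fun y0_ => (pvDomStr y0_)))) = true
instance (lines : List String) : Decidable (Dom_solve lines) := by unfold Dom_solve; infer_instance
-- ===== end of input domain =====

-- B replaces A's per-character membership-scan dedup and 26-letter all() scan by set
-- union / alphabet-seeded set intersection over each group's lines (objective: simpler).
-- Both A and B append '' to the caller's list; the equivalence proved is about the return value.

-- ===== PORT A =====
def pvAlphabet : List Char := "abcdefghijklmnopqrstuvwxyz".toList

def nbYesFor (lines : List String) : Int :=
  ((lines.foldl (fun answers line =>
      line.toList.foldl (fun answers x =>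
        if answers.contains x then answers else answers ++ [x]) answers)
    ([] : List Char)).length : Int)

def nbAllYesFor (lines : List String) : Int :=
  ((pvAlphabet.foldl (fun answers x =>
      if lines.all (fun line => line.toList.contains x) then answers ++ [x] else answers)
    ([] : List Char)).length : Int)

def solve (lines : List String) : Int × Int :=
  let st := (lines ++ [""]).foldl (fun (st : Int × Int × List String) line =>
      if line = "" then (st.1 + nbYesFor st.2.2, st.2.1 + nbAllYesFor st.2.2, ([] : List String))
      else (st.1, st.2.1, st.2.2 ++ [line])) (0, 0, ([] : List String))
  (st.1, st.2.1)

-- ===== PORT B =====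
def unionCount (buffer : List String) : Int :=
  PySem.Set.len (buffer.foldl
    (fun (s : PySem.Set Char) l => PySem.Set.union s (PySem.Set.ofList l.toList))
    PySem.Set.empty)

def interCount (buffer : List String) : Int :=
  PySem.Set.len (buffer.foldl
    (fun (s : PySem.Set Char) l => PySem.Set.inter s (PySem.Set.ofList l.toList))
    (PySem.Set.ofList "abcdefghijklmnopqrstuvwxyz".toList))

def solve_alt (lines : List String) : Int × Int :=
  let st := (lines ++ [""]).foldl (fun (st : Int × Int × List String) line =>
      if line = "" then (st.1 + unionCount st.2.2, st.2.1 + interCount st.2.2, ([] : List String))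
      else (st.1, st.2.1, st.2.2 ++ [line])) (0, 0, ([] : List String))
  (st.1, st.2.1)

-- ===== PRECONDITION & SPEC =====
def Spec_solve (lines : List String) (out : Int × Int) : Prop := out = solve_alt lines
instance (lines : List String) (out : Int × Int) : Decidable (Spec_solve lines out) := by unfold Spec_solve; infer_instance

-- ===== CLAIM (what is proved, stated in full; the proofs are below) =====
def Claim_equal_solve : Prop := ∀ (lines : List String), Dom_solve lines → Spec_solve lines (solve lines)

-- ===== LEMMAS AND PROOFS =====

-- A's inner character loop is exactly PySem.Set.update.
lemma innerA_eq_update (cs : List Char) (s : PySem.Set Char) :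
    cs.foldl (fun answers x => if List.contains answers x then answers else answers ++ [x]) s
      = PySem.Set.update s cs := by
  induction cs generalizing s with
  | nil => rfl
  | cons c cs ih =>
      simp only [List.foldl_cons, PySem.Set.update_cons, ih]
      rfl

lemma foldA_eq (buf : List String) (s : PySem.Set Char) :
    buf.foldl (fun answers line =>
        line.toList.foldl (fun answers x =>
          if List.contains answers x then answers else answers ++ [x]) answers) s
      = buf.foldl (fun answers line => PySem.Set.update answers line.toList) s := by
  have h : (fun (answers : PySem.Set Char) (line : String) =>
      line.toList.foldl (fun answers x =>
        if List.contains answers x then answers else answers ++ [x]) answers)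
      = (fun answers line => PySem.Set.update answers line.toList) := by
    funext answers line
    exact innerA_eq_update _ _
  rw [h]

lemma memA (buf : List String) (s : PySem.Set Char) (y : Char) :
    (y ∈ buf.foldl (fun answers line => PySem.Set.update answers line.toList) s
      ↔ y ∈ s ∨ ∃ l ∈ buf, y ∈ l.toList) := by
  induction buf generalizing s with
  | nil => simp
  | cons l buf ih =>
      simp only [List.foldl_cons, ih, PySem.Set.mem_update, List.mem_cons]
      aesop

lemma nodupA (buf : List String) (s : PySem.Set Char) (hs : s.Nodup) :
    (buf.foldl (fun answers line => PySem.Set.update answers line.toList) s).Nodup := by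
  induction buf generalizing s with
  | nil => exact hs
  | cons l buf ih =>
      exact ih _ (PySem.Set.nodup_update s l.toList hs)

lemma memB (buf : List String) (s : PySem.Set Char) (y : Char) :
    (y ∈ buf.foldl (fun s l => PySem.Set.union s (PySem.Set.ofList l.toList)) s
      ↔ y ∈ s ∨ ∃ l ∈ buf, y ∈ l.toList) := by
  induction buf generalizing s with
  | nil => simp
  | cons l buf ih =>
      simp only [List.foldl_cons, ih, PySem.Set.mem_union, PySem.Set.mem_ofList, List.mem_cons]
      aesop

lemma nodupB (buf : List String) (s : PySem.Set Char) (hs : s.Nodup) :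
    (buf.foldl (fun s l => PySem.Set.union s (PySem.Set.ofList l.toList)) s).Nodup := by
  induction buf generalizing s with
  | nil => exact hs
  | cons l buf ih => exact ih _ (PySem.Set.nodup_union s _ hs)

lemma memBI (buf : List String) (s : PySem.Set Char) (y : Char) :
    (y ∈ buf.foldl (fun s l => PySem.Set.inter s (PySem.Set.ofList l.toList)) s
      ↔ y ∈ s ∧ ∀ l ∈ buf, y ∈ l.toList) := by
  induction buf generalizing s with
  | nil => simp
  | cons l buf ih =>
      simp only [List.foldl_cons, ih, PySem.Set.mem_inter, PySem.Set.mem_ofList, List.mem_cons]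
      constructor
      · rintro ⟨⟨h1, h2⟩, h3⟩
        refine ⟨h1, ?_⟩
        rintro l' (rfl | hl)
        · exact h2
        · exact h3 l' hl
      · rintro ⟨h1, h2⟩
        exact ⟨⟨h1, h2 l (Or.inl rfl)⟩, fun l' hl => h2 l' (Or.inr hl)⟩

lemma nodupBI (buf : List String) (s : PySem.Set Char) (hs : s.Nodup) :
    (buf.foldl (fun s l => PySem.Set.inter s (PySem.Set.ofList l.toList)) s).Nodup := by
  induction buf generalizing s with
  | nil => exact hs
  | cons l buf ih => exact ih _ (PySem.Set.nodup_inter s _ hs)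

lemma yes_eq (buf : List String) : nbYesFor buf = unionCount buf := by
  unfold nbYesFor unionCount PySem.Set.len
  congr 1
  refine List.Perm.length_eq ?_
  rw [foldA_eq]
  refine (List.perm_ext_iff_of_nodup (nodupA buf [] List.nodup_nil)
    (nodupB buf PySem.Set.empty List.nodup_nil)).2 (fun y => ?_)
  rw [memA, memB]
  simp [PySem.Set.empty]

lemma allyes_eq (buf : List String) : nbAllYesFor buf = interCount buf := by
  unfold nbAllYesFor interCount PySem.Set.len
  congr 1
  refine List.Perm.length_eq ?_
  have hA : pvAlphabet.foldl (fun answers x =>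
      if buf.all (fun line => line.toList.contains x) then answers ++ [x] else answers)
      ([] : List Char) = pvAlphabet.filter (fun x => buf.all (fun line => line.toList.contains x)) := by
    rw [PySem.List.foldl_append_if_eq_filter]; rfl
  rw [hA]
  have hnA : (pvAlphabet.filter (fun x => buf.all (fun line => line.toList.contains x))).Nodup :=
    List.Nodup.filter _ (by decide)
  have hnB : List.Nodup (buf.foldl (fun s l => PySem.Set.inter s (PySem.Set.ofList l.toList))
      (PySem.Set.ofList "abcdefghijklmnopqrstuvwxyz".toList)) :=
    nodupBI buf _ (PySem.Set.nodup_ofList _)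
  refine (List.perm_ext_iff_of_nodup hnA hnB).2 (fun y => ?_)
  rw [memBI]
  simp [List.mem_filter, PySem.Set.mem_ofList, pvAlphabet, List.all_eq_true]

theorem solve_eq_alt (lines : List String) : solve lines = solve_alt lines := by
  unfold solve solve_alt
  have : (fun (st : Int × Int × List String) line =>
      if line = "" then (st.1 + nbYesFor st.2.2, st.2.1 + nbAllYesFor st.2.2, ([] : List String))
      else (st.1, st.2.1, st.2.2 ++ [line]))
    = (fun (st : Int × Int × List String) line =>
      if line = "" then (st.1 + unionCount st.2.2, st.2.1 + interCount st.2.2, ([] : List String))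
      else (st.1, st.2.1, st.2.2 ++ [line])) := by
    funext st line
    rw [yes_eq, allyes_eq]
  rw [this]

-- ===== VERDICT (by name: the statement is the Claim_ definition above) =====
theorem solve_spec : Claim_equal_solve := by
  intro lines _
  unfold Spec_solve
  exact solve_eq_alt lines
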